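-- pv_equiv track=rewrite | github.com/yonaries/Competitive-Programming | A_Young_Physicist.py | young_physicist
-- ===== SOURCE A (Python) =====
-- def young_physicist(arr, length):
--     x = 0
--     y = 0
--     z = 0
--     for i in range(length):
--         x += arr[i][0]
--         y += arr[i][1]
--         z += arr[i][2]
--     if x == 0 and y == 0 and z == 0:
--         return "YES"
--     else:
--         return "NO"
-- ===== SOURCE B (Python) =====
-- def young_physicist(arr, length):
--     # three independent coordinate scans with early exit instead of one fused pass
--     if sum(arr[i][0] for i in range(length)) != 0:
--         return "NO"
--     if sum(arr[i][1] for i in range(length)) != 0: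
--         return "NO"
--     if sum(arr[i][2] for i in range(length)) != 0:
--         return "NO"
--     return "YES"
-- ===== Notes on version B (the rewrite author's own statement) =====
-- stated objective: alternative
-- what changed: Replaces the single fused pass with three-accumulator state by three independent per-coordinate scans, each an early-returning zero test of one column sum.
import Mathlib
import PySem

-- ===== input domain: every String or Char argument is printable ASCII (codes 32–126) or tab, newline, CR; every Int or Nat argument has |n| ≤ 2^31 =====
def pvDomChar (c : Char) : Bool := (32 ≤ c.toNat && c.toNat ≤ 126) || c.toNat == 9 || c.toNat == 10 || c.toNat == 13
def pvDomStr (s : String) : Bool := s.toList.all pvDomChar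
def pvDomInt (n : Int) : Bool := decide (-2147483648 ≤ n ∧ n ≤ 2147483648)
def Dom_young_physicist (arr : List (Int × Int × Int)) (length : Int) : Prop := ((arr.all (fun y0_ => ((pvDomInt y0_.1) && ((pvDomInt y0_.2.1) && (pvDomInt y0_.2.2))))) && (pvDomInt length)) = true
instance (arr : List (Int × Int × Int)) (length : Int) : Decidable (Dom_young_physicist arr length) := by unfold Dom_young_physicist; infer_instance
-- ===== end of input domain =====

-- B replaces A's single fused three-accumulator pass by three independent
-- per-coordinate scans, each an early-returning zero test of one column sum
-- (objective: alternative, same cost).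

-- ===== PORT A =====
-- arr[i] is exact under Pre_ (0 ≤ i < length ≤ len arr), so pyGetD's default is never taken
def young_physicist (arr : List (Int × Int × Int)) (length : Int) : String :=
  let s := (PySem.List.pyRange 0 length 1).foldl
    (fun (acc : Int × Int × Int) i =>
      let v := PySem.List.pyGetD arr i (0, 0, 0)
      (acc.1 + v.1, acc.2.1 + v.2.1, acc.2.2 + v.2.2)) (0, 0, 0)
  if s.1 = 0 ∧ s.2.1 = 0 ∧ s.2.2 = 0 then "YES" else "NO"

-- ===== PORT B =====
-- sum(arr[i][k] for i in range(length)) for one coordinate selector f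
def ypColSum (arr : List (Int × Int × Int)) (length : Int) (f : Int × Int × Int → Int) : Int :=
  (PySem.List.pyRange 0 length 1).foldl
    (fun acc i => acc + f (PySem.List.pyGetD arr i (0, 0, 0))) 0

def young_physicist_alt (arr : List (Int × Int × Int)) (length : Int) : String :=
  if ypColSum arr length (fun v => v.1) ≠ 0 then "NO"
  else if ypColSum arr length (fun v => v.2.1) ≠ 0 then "NO"
  else if ypColSum arr length (fun v => v.2.2) ≠ 0 then "NO"
  else "YES"

-- ===== PRECONDITION & SPEC =====
-- A raises IndexError when length > len(arr); those inputs are excluded.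
def Pre_young_physicist (arr : List (Int × Int × Int)) (length : Int) : Prop :=
  length ≤ (arr.length : Int)
instance (arr : List (Int × Int × Int)) (length : Int) : Decidable (Pre_young_physicist arr length) := by unfold Pre_young_physicist; infer_instance

def pvWitness_young_physicist : (List (Int × Int × Int)) × Int := ([(1, -1, 0), (-1, 1, 0)], 2)

def Spec_young_physicist (arr : List (Int × Int × Int)) (length : Int) (out : String) : Prop := out = young_physicist_alt arr length
instance (arr : List (Int × Int × Int)) (length : Int) (out : String) : Decidable (Spec_young_physicist arr length out) := by unfold Spec_young_physicist; infer_instance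

-- ===== CLAIM (what is proved, stated in full; the proofs are below) =====
def Claim_equal_young_physicist : Prop := ∀ (arr : List (Int × Int × Int)) (length : Int), Dom_young_physicist arr length → Pre_young_physicist arr length → Spec_young_physicist arr length (young_physicist arr length)

-- ===== LEMMAS AND PROOFS =====
-- the fused three-accumulator fold is the triple of the three component folds
theorem yp_foldl_prod3 {α : Type} (l : List α) (f1 f2 f3 : α → Int) (a b c : Int) :
    l.foldl (fun (acc : Int × Int × Int) i => (acc.1 + f1 i, acc.2.1 + f2 i, acc.2.2 + f3 i)) (a, b, c)
      = (l.foldl (fun s i => s + f1 i) a, l.foldl (fun s i => s + f2 i) b, l.foldl (fun s i => s + f3 i) c) := by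
  induction l generalizing a b c with
  | nil => rfl
  | cons h t ih => simp [List.foldl, ih]

-- ===== VERDICT (by name: the statement is the Claim_ definition above) =====
theorem young_physicist_spec : Claim_equal_young_physicist := by
  intro arr length _ _
  unfold Spec_young_physicist young_physicist young_physicist_alt ypColSum
  rw [yp_foldl_prod3]
  split_ifs with h h1 h2 <;> simp_all
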